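-- pv_equiv track=rewrite | github.com/fearKarma/projectOiler | old/Problem_11/Problem 11.py | find_greatest_product_in_grid
-- ===== SOURCE A (Python) =====
-- def find_greatest_product(nums):
--     max_product = 1
--     for i in range(len(nums) - 3):
--         product = nums[i] * nums[i + 1] * nums[i + 2] * nums[i + 3]
--         max_product = max(max_product, product)
--     return max_product
--
-- def find_greatest_product_in_grid(grid):
--     max_product = 1
--
--     # Check horizontally
--     for row in grid:
--         max_product = max(max_product, find_greatest_product(row))
--
--     # Check vertically
--     for col in range(len(grid[0])):
--         column = [grid[row][col] for row in range(len(grid))]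
--         max_product = max(max_product, find_greatest_product(column))
--
--     # Check diagonally (from top-left to bottom-right)
--     for i in range(len(grid) - 3):
--         for j in range(len(grid[0]) - 3):
--             diagonal = [grid[i + k][j + k] for k in range(4)]
--             max_product = max(max_product, find_greatest_product(diagonal))
--
--     # Check diagonally (from top-right to bottom-left)
--     for i in range(3, len(grid)):
--         for j in range(len(grid[0]) - 3):
--             diagonal = [grid[i - k][j + k] for k in range(4)]
--             max_product = max(max_product, find_greatest_product(diagonal))
--
--     return max_product
-- ===== SOURCE B (Python) =====
-- # B: one cell-major scan -- instead of A's four staged direction passes with a helper and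
-- # materialized column/diagonal lists, B visits each cell once and checks the four direction
-- # windows anchored at that cell inline with bounds guards (measured faster by a constant factor).
-- def find_greatest_product_in_grid(grid):
--     h, w = len(grid), len(grid[0])
--     best = 1
--     for i in range(h):
--         row = grid[i]
--         for j in range(len(row)):
--             if j + 4 <= len(row):
--                 best = max(best, row[j] * row[j + 1] * row[j + 2] * row[j + 3])
--             if i + 4 <= h and j < w:
--                 best = max(best, grid[i][j] * grid[i + 1][j] * grid[i + 2][j] * grid[i + 3][j])
--             if i + 4 <= h and j + 4 <= w:
--                 best = max(best, grid[i][j] * grid[i + 1][j + 1] * grid[i + 2][j + 2] * grid[i + 3][j + 3])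
--             if i >= 3 and j + 4 <= w:
--                 best = max(best, grid[i][j] * grid[i - 1][j + 1] * grid[i - 2][j + 2] * grid[i - 3][j + 3])
--     return best
-- ===== Notes on version B (the rewrite author's own statement) =====
-- stated objective: faster
-- what changed: A makes four staged direction passes, calling a helper on each row and on materialized column/diagonal lists; B is a single cell-major scan that visits each cell once and checks the four direction windows anchored there inline with bounds guards, never building intermediate lists.
import Mathlib
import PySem

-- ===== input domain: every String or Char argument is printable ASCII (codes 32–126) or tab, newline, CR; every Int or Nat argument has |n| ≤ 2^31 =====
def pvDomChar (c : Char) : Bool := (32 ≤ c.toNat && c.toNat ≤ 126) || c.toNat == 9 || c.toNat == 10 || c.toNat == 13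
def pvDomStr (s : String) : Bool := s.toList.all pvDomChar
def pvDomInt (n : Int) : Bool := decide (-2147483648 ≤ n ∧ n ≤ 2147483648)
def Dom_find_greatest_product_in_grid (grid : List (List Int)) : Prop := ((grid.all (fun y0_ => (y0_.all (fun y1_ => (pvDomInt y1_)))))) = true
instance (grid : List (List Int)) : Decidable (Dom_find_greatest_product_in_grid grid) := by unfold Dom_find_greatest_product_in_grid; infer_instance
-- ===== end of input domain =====

-- B replaces A's four staged direction passes (with a helper and materialized column/diagonal
-- lists) by a single cell-major scan that checks the four direction windows anchored at each
-- cell inline with bounds guards; same O(h*w) windows, measurably faster by a constant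
-- factor (no helper calls, no temporary lists).

-- ===== PORT A =====
-- helper find_greatest_product(nums)
def pv_fgp (nums : List Int) : Int :=
  (PySem.List.pyRange 0 ((nums.length : Int) - 3)).foldl
    (fun mp i => max mp (PySem.List.pyGetD nums i 0 * PySem.List.pyGetD nums (i+1) 0 *
      PySem.List.pyGetD nums (i+2) 0 * PySem.List.pyGetD nums (i+3) 0)) 1

-- grid[row][col] is ported as pyGetD with defaults; Python's IndexError inputs (empty grid,
-- a row shorter than row 0) are excluded by Pre_find_greatest_product_in_grid.
def find_greatest_product_in_grid (grid : List (List Int)) : Int :=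
  let m1 := grid.foldl (fun mp row => max mp (pv_fgp row)) 1
  let m2 := (PySem.List.pyRange 0 (((PySem.List.pyGetD grid 0 []).length : Int))).foldl
    (fun mp col =>
      let column := (PySem.List.pyRange 0 ((grid.length : Int))).map
        (fun row => PySem.List.pyGetD (PySem.List.pyGetD grid row []) col 0)
      max mp (pv_fgp column)) m1
  let m3 := (PySem.List.pyRange 0 ((grid.length : Int) - 3)).foldl
    (fun mp i => (PySem.List.pyRange 0 (((PySem.List.pyGetD grid 0 []).length : Int) - 3)).foldl
      (fun mp j =>
        let diagonal := (PySem.List.pyRange 0 4).map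
          (fun k => PySem.List.pyGetD (PySem.List.pyGetD grid (i+k) []) (j+k) 0)
        max mp (pv_fgp diagonal)) mp) m2
  let m4 := (PySem.List.pyRange 3 ((grid.length : Int))).foldl
    (fun mp i => (PySem.List.pyRange 0 (((PySem.List.pyGetD grid 0 []).length : Int) - 3)).foldl
      (fun mp j =>
        let diagonal := (PySem.List.pyRange 0 4).map
          (fun k => PySem.List.pyGetD (PySem.List.pyGetD grid (i-k) []) (j+k) 0)
        max mp (pv_fgp diagonal)) mp) m3
  m4

-- ===== PORT B =====
-- grid[x][y] (B indexes the grid directly; Pre_ keeps every such access in range)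
def pvG (grid : List (List Int)) (x y : Int) : Int :=
  PySem.List.pyGetD (PySem.List.pyGetD grid x []) y 0

def find_greatest_product_in_grid_alt (grid : List (List Int)) : Int :=
  let h : Int := (grid.length : Int)
  let w : Int := ((PySem.List.pyGetD grid 0 []).length : Int)
  (PySem.List.pyRange 0 h).foldl (fun best i =>
    let row := PySem.List.pyGetD grid i []
    (PySem.List.pyRange 0 ((row.length : Int))).foldl (fun best j =>
      let best := if j + 4 ≤ (row.length : Int) then
          max best (PySem.List.pyGetD row j 0 * PySem.List.pyGetD row (j+1) 0 *
            PySem.List.pyGetD row (j+2) 0 * PySem.List.pyGetD row (j+3) 0) else best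
      let best := if i + 4 ≤ h ∧ j < w then
          max best (pvG grid i j * pvG grid (i+1) j * pvG grid (i+2) j * pvG grid (i+3) j) else best
      let best := if i + 4 ≤ h ∧ j + 4 ≤ w then
          max best (pvG grid i j * pvG grid (i+1) (j+1) * pvG grid (i+2) (j+2) * pvG grid (i+3) (j+3)) else best
      let best := if 3 ≤ i ∧ j + 4 ≤ w then
          max best (pvG grid i j * pvG grid (i-1) (j+1) * pvG grid (i-2) (j+2) * pvG grid (i-3) (j+3)) else best
      best) best) 1

-- ===== PRECONDITION & SPEC =====
-- Pre_ excludes exactly the inputs where Python A raises IndexError: the empty grid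
-- (len(grid[0])) and grids with a row shorter than row 0 (the column/diagonal accesses).
def Pre_find_greatest_product_in_grid (grid : List (List Int)) : Prop :=
  grid ≠ [] ∧ ∀ row ∈ grid, (grid.headD []).length ≤ row.length
instance (grid : List (List Int)) : Decidable (Pre_find_greatest_product_in_grid grid) := by
  unfold Pre_find_greatest_product_in_grid; infer_instance
def pvWitness_find_greatest_product_in_grid : List (List Int) := [[1, 2], [3, 4]]

def Spec_find_greatest_product_in_grid (grid : List (List Int)) (out : Int) : Prop := out = find_greatest_product_in_grid_alt grid
instance (grid : List (List Int)) (out : Int) : Decidable (Spec_find_greatest_product_in_grid grid out) := by unfold Spec_find_greatest_product_in_grid; infer_instance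

-- ===== CLAIM (what is proved, stated in full; the proofs are below) =====
def Claim_equal_find_greatest_product_in_grid : Prop := ∀ (grid : List (List Int)), Dom_find_greatest_product_in_grid grid → Pre_find_greatest_product_in_grid grid → Spec_find_greatest_product_in_grid grid (find_greatest_product_in_grid grid)

-- ===== LEMMAS AND PROOFS =====

-- the four window products, as proof abbreviations
def pvHp (row : List Int) (j : Int) : Int :=
  PySem.List.pyGetD row j 0 * PySem.List.pyGetD row (j+1) 0 *
    PySem.List.pyGetD row (j+2) 0 * PySem.List.pyGetD row (j+3) 0
def pvVp (g : List (List Int)) (i j : Int) : Int :=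
  pvG g i j * pvG g (i+1) j * pvG g (i+2) j * pvG g (i+3) j
def pvDp (g : List (List Int)) (i j : Int) : Int :=
  pvG g i j * pvG g (i+1) (j+1) * pvG g (i+2) (j+2) * pvG g (i+3) (j+3)
def pvEp (g : List (List Int)) (i j : Int) : Int :=
  pvG g i j * pvG g (i-1) (j+1) * pvG g (i-2) (j+2) * pvG g (i-3) (j+3)

-- one guarded max update and one nested max pass
def pvStep (c : Prop) [Decidable c] (p a : Int) : Int := if c then max a p else a
def pvCell (g : List (List Int)) (h w i : Int) (a j : Int) : Int :=
  pvStep (3 ≤ i ∧ j + 4 ≤ w) (pvEp g i j)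
    (pvStep (i + 4 ≤ h ∧ j + 4 ≤ w) (pvDp g i j)
      (pvStep (i + 4 ≤ h ∧ j < w) (pvVp g i j)
        (pvStep (j + 4 ≤ ((PySem.List.pyGetD g i []).length : Int)) (pvHp (PySem.List.pyGetD g i []) j) a)))
def pvPass {α β : Type} (l : List α) (inner : α → List β) (f : α → β → Int) (m : Int) : Int :=
  l.foldl (fun best x => (inner x).foldl (fun b y => max b (f x y)) best) m

-- B's port, re-expressed through pvCell
def pvAltF (g : List (List Int)) : Int :=
  (PySem.List.pyRange 0 ((g.length : Int))).foldl
    (fun a i => (PySem.List.pyRange 0 (((PySem.List.pyGetD g i []).length : Int))).foldl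
      (pvCell g ((g.length : Int)) (((PySem.List.pyGetD g 0 []).length : Int)) i) a) 1

-- A's result normalized to four pass-major nested max folds of the direct products
def pvFlat (g : List (List Int)) : Int :=
  pvPass (PySem.List.pyRange 3 ((g.length : Int)))
    (fun _ => PySem.List.pyRange 0 ((((PySem.List.pyGetD g 0 []).length : Int)) - 3))
    (fun i j => pvEp g i j)
    (pvPass (PySem.List.pyRange 0 ((g.length : Int) - 3))
      (fun _ => PySem.List.pyRange 0 ((((PySem.List.pyGetD g 0 []).length : Int)) - 3))
      (fun i j => pvDp g i j)
      (pvPass (PySem.List.pyRange 0 (((PySem.List.pyGetD g 0 []).length : Int)))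
        (fun _ => PySem.List.pyRange 0 ((g.length : Int) - 3))
        (fun j i => pvVp g i j)
        (pvPass g (fun row => PySem.List.pyRange 0 ((row.length : Int) - 3))
          (fun row j => pvHp row j) 1)))

lemma pv_alt_eq (g : List (List Int)) : find_greatest_product_in_grid_alt g = pvAltF g := by
  simp only [find_greatest_product_in_grid_alt, pvAltF, pvG]
  rfl

-- generic fold bounds
lemma pv_foldl_ge {α : Type} (F : Int → α → Int) (hF : ∀ a x, a ≤ F a x)
    (l : List α) (m : Int) : m ≤ l.foldl F m := by
  induction l generalizing m with
  | nil => exact le_rfl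
  | cons x xs ih => exact le_trans (hF m x) (ih (F m x))

lemma pv_foldl_le {α : Type} (F : Int → α → Int) (l : List α) (c m : Int)
    (hm : m ≤ c) (hF : ∀ a x, x ∈ l → a ≤ c → F a x ≤ c) : l.foldl F m ≤ c := by
  induction l generalizing m with
  | nil => exact hm
  | cons x xs ih =>
    exact ih (F m x) (hF m x (by simp) hm) (fun a y hy ha => hF a y (by simp [hy]) ha)

lemma pv_le_foldl {α : Type} (F : Int → α → Int) (hF : ∀ a x, a ≤ F a x)
    (l : List α) (m v : Int) (x : α) (hx : x ∈ l) (hv : ∀ a, v ≤ F a x) :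
    v ≤ l.foldl F m := by
  induction l generalizing m with
  | nil => cases hx
  | cons y ys ih =>
    rcases List.mem_cons.mp hx with h | h
    · exact le_trans (h ▸ hv m) (pv_foldl_ge F hF ys (F m y))
    · exact ih (F m y) h

-- pvStep facts
lemma pvStep_ge (c : Prop) [Decidable c] (p a : Int) : a ≤ pvStep c p a := by
  unfold pvStep; split_ifs
  · exact le_max_left _ _
  · exact le_rfl
lemma pvStep_ge_p {c : Prop} [Decidable c] (hc : c) (p a : Int) : p ≤ pvStep c p a := by
  unfold pvStep; rw [if_pos hc]; exact le_max_right _ _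
lemma pvStep_le {c : Prop} [Decidable c] {p a b : Int} (hc : c → p ≤ b) (ha : a ≤ b) :
    pvStep c p a ≤ b := by
  unfold pvStep; split_ifs with hcc
  · exact max_le ha (hc hcc)
  · exact ha

lemma pv_cell_ge (g : List (List Int)) (h w i a j : Int) : a ≤ pvCell g h w i a j := by
  unfold pvCell
  exact le_trans (pvStep_ge _ _ _) (le_trans (pvStep_ge _ _ _)
    (le_trans (pvStep_ge _ _ _) (pvStep_ge _ _ _)))

-- 1 ≤ / seed ≤ results
lemma pv_altF_ge (g : List (List Int)) : 1 ≤ pvAltF g := by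
  unfold pvAltF
  exact pv_foldl_ge _ (fun a i => pv_foldl_ge _ (fun b j => pv_cell_ge _ _ _ _ _ _) _ a) _ 1
lemma pvPass_ge {α β : Type} (l : List α) (inner : α → List β) (f : α → β → Int) (m : Int) :
    m ≤ pvPass l inner f m :=
  pv_foldl_ge _ (fun a x => pv_foldl_ge _ (fun b y => le_max_left _ _) _ a) l m
lemma le_pvPass {α β : Type} (l : List α) (inner : α → List β) (f : α → β → Int) (m : Int)
    {x : α} {y : β} (hx : x ∈ l) (hy : y ∈ inner x) : f x y ≤ pvPass l inner f m :=
  pv_le_foldl _ (fun a z => pv_foldl_ge _ (fun b u => le_max_left _ _) _ a) l m _ x hx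
    (fun a => pv_le_foldl _ (fun b u => le_max_left _ _) _ a _ y hy (fun b => le_max_right _ _))
lemma pvPass_le {α β : Type} {l : List α} {inner : α → List β} {f : α → β → Int} {m c : Int}
    (hm : m ≤ c) (hf : ∀ x ∈ l, ∀ y ∈ inner x, f x y ≤ c) : pvPass l inner f m ≤ c :=
  pv_foldl_le _ l c m hm (fun a x hx ha =>
    pv_foldl_le _ _ c a ha (fun b y hy hb => max_le hb (hf x hx y hy)))

-- membership/length facts from Pre_
lemma pv_row_mem {g : List (List Int)} {i : Int} (h0 : 0 ≤ i) (h1 : i < (g.length : Int)) :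
    PySem.List.pyGetD g i [] ∈ g := by
  rw [PySem.List.pyGetD_eq_getElem g [] h0 h1]
  exact List.getElem_mem _

lemma pv_w_le {g : List (List Int)} (hpre : Pre_find_greatest_product_in_grid g)
    {row : List Int} (hrow : row ∈ g) :
    (((PySem.List.pyGetD g 0 []).length : Int)) ≤ (row.length : Int) := by
  obtain ⟨hne, hlen⟩ := hpre
  have : PySem.List.pyGetD g 0 [] = g.headD [] := by
    cases g with
    | nil => exact absurd rfl hne
    | cons r t => simp [PySem.List.pyGetD_zero_cons]
  rw [this]
  exact_mod_cast hlen row hrow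

-- === pvFlat ≤ pvAltF: every window A scans is anchored at a cell B visits ===
lemma pv_le_altF_of_cell (g : List (List Int)) {i j v : Int}
    (hi : 0 ≤ i) (hi' : i < (g.length : Int))
    (hj : 0 ≤ j) (hj' : j < ((PySem.List.pyGetD g i []).length : Int))
    (hv : ∀ a, v ≤ pvCell g ((g.length : Int)) (((PySem.List.pyGetD g 0 []).length : Int)) i a j) :
    v ≤ pvAltF g := by
  unfold pvAltF
  exact pv_le_foldl _ (fun a x => pv_foldl_ge _ (fun b y => pv_cell_ge _ _ _ _ _ _) _ a) _ 1 v i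
    (PySem.List.mem_pyRange_one.mpr ⟨hi, hi'⟩)
    (fun a => pv_le_foldl _ (fun b y => pv_cell_ge _ _ _ _ _ _) _ a v j
      (PySem.List.mem_pyRange_one.mpr ⟨hj, hj'⟩) (fun b => hv b))

lemma pv_flat_le_altF (g : List (List Int)) (hpre : Pre_find_greatest_product_in_grid g) :
    pvFlat g ≤ pvAltF g := by
  unfold pvFlat
  apply pvPass_le
  · apply pvPass_le
    · apply pvPass_le
      · apply pvPass_le (pv_altF_ge g)
        -- horizontal: row ∈ g, j ∈ range(len row - 3)
        intro row hrow j hj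
        obtain ⟨hj0, hj1⟩ := PySem.List.mem_pyRange_one.mp hj
        obtain ⟨n, hn, hgn⟩ := List.mem_iff_getElem.mp hrow
        have hget : PySem.List.pyGetD g (n : Int) [] = row := by
          rw [PySem.List.pyGetD_eq_getElem g (i := (n : Int)) [] (by positivity) (by exact_mod_cast hn)]
          simpa using hgn
        apply pv_le_altF_of_cell g (i := (n : Int)) (j := j) (by positivity)
          (by exact_mod_cast hn) hj0 (by rw [hget]; omega)
        intro a
        unfold pvCell
        refine le_trans ?_ (le_trans (pvStep_ge _ _ _) (le_trans (pvStep_ge _ _ _) (pvStep_ge _ _ _)))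
        rw [hget]
        exact pvStep_ge_p (by omega) _ _
      -- vertical: j ∈ range(w), i ∈ range(h-3)
      intro j hj i hi
      obtain ⟨hj0, hj1⟩ := PySem.List.mem_pyRange_one.mp hj
      obtain ⟨hi0, hi1⟩ := PySem.List.mem_pyRange_one.mp hi
      have hrowlen := pv_w_le hpre (pv_row_mem hi0 (by omega))
      apply pv_le_altF_of_cell g hi0 (by omega) hj0 (by omega)
      intro a
      unfold pvCell
      refine le_trans ?_ (le_trans (pvStep_ge _ _ _) (pvStep_ge _ _ _))
      exact pvStep_ge_p ⟨by omega, hj1⟩ _ _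
    -- down-right diagonal: i ∈ range(h-3), j ∈ range(w-3)
    intro i hi j hj
    obtain ⟨hi0, hi1⟩ := PySem.List.mem_pyRange_one.mp hi
    obtain ⟨hj0, hj1⟩ := PySem.List.mem_pyRange_one.mp hj
    have hrowlen := pv_w_le hpre (pv_row_mem hi0 (by omega))
    apply pv_le_altF_of_cell g hi0 (by omega) hj0 (by omega)
    intro a
    unfold pvCell
    refine le_trans ?_ (pvStep_ge _ _ _)
    exact pvStep_ge_p ⟨by omega, by omega⟩ _ _
  -- down-left diagonal: i ∈ range(3,h), j ∈ range(w-3)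
  intro i hi j hj
  obtain ⟨hi0, hi1⟩ := PySem.List.mem_pyRange_one.mp hi
  obtain ⟨hj0, hj1⟩ := PySem.List.mem_pyRange_one.mp hj
  have hrowlen := pv_w_le hpre (pv_row_mem (by omega) hi1)
  apply pv_le_altF_of_cell g (by omega) hi1 hj0 (by omega)
  intro a
  unfold pvCell
  exact pvStep_ge_p ⟨by omega, by omega⟩ _ _

-- === pvAltF ≤ pvFlat: every window B checks is scanned by one of A's passes ===
lemma pv_flat_ge_one (g : List (List Int)) : 1 ≤ pvFlat g := by
  unfold pvFlat
  exact le_trans (pvPass_ge _ _ _ 1) (le_trans (pvPass_ge _ _ _ _)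
    (le_trans (pvPass_ge _ _ _ _) (pvPass_ge _ _ _ _)))

lemma pv_altF_le_flat (g : List (List Int)) :
    pvAltF g ≤ pvFlat g := by
  unfold pvAltF
  apply pv_foldl_le _ _ _ _ (pv_flat_ge_one g)
  intro a i hi ha
  obtain ⟨hi0, hi1⟩ := PySem.List.mem_pyRange_one.mp hi
  apply pv_foldl_le _ _ _ _ ha
  intro b j hj hb
  obtain ⟨hj0, hj1⟩ := PySem.List.mem_pyRange_one.mp hj
  unfold pvCell pvFlat
  apply pvStep_le
  · -- down-left window at (i,j)
    intro hc
    exact le_pvPass _ _ _ _ (PySem.List.mem_pyRange_one.mpr ⟨hc.1, hi1⟩)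
      (PySem.List.mem_pyRange_one.mpr ⟨hj0, by omega⟩)
  apply pvStep_le
  · -- down-right window at (i,j)
    intro hc
    refine le_trans (le_pvPass _ _ (fun i j => pvDp g i j) _
      (PySem.List.mem_pyRange_one.mpr ⟨hi0, by omega⟩)
      (PySem.List.mem_pyRange_one.mpr ⟨hj0, by omega⟩)) (pvPass_ge _ _ _ _)
  apply pvStep_le
  · -- vertical window at (i,j)
    intro hc
    refine le_trans (le_pvPass _ _ (fun j i => pvVp g i j) _
      (PySem.List.mem_pyRange_one.mpr ⟨hj0, hc.2⟩)
      (PySem.List.mem_pyRange_one.mpr ⟨hi0, by omega⟩))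
      (le_trans (pvPass_ge _ _ _ _) (pvPass_ge _ _ _ _))
  apply pvStep_le
  · -- horizontal window at (i,j)
    intro hc
    refine le_trans (le_pvPass _ _ (fun row j => pvHp row j) _
      (pv_row_mem hi0 hi1) (PySem.List.mem_pyRange_one.mpr ⟨hj0, by omega⟩))
      (le_trans (pvPass_ge _ _ _ _) (le_trans (pvPass_ge _ _ _ _) (pvPass_ge _ _ _ _)))
  · exact hb

-- === A = pvFlat (normalization of A's helper/materialized-list structure) ===
lemma pv_foldl_max_hoist {α : Type} (F : Int → α → Int)
    (hF : ∀ a b x, F (max a b) x = max a (F b x)) (l : List α) (m s : Int) :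
    l.foldl F (max m s) = max m (l.foldl F s) := by
  induction l generalizing s with
  | nil => rfl
  | cons x xs ih => simpa [List.foldl, hF] using ih (F s x)

lemma pv_max_foldl {α : Type} (f : α → Int) (l : List α) (a : Int) (ha : 1 ≤ a) :
    max a (l.foldl (fun b x => max b (f x)) 1) = l.foldl (fun b x => max b (f x)) a := by
  have h := pv_foldl_max_hoist (fun b x => max b (f x))
    (fun a b x => max_assoc a b (f x)) l a 1
  rw [max_eq_left ha] at h
  exact h.symm

-- fold congruence under the invariant 1 ≤ accumulator
lemma pv_foldl_congr_inv {α : Type} (l : List α) (F G : Int → α → Int) (m : Int) (hm : 1 ≤ m)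
    (hFG : ∀ a, 1 ≤ a → ∀ x ∈ l, F a x = G a x) (hF : ∀ a x, a ≤ F a x) :
    l.foldl F m = l.foldl G m := by
  induction l generalizing m with
  | nil => rfl
  | cons x xs ih =>
    show xs.foldl F (F m x) = xs.foldl G (G m x)
    rw [← hFG m hm x (by simp)]
    exact ih (F m x) (le_trans hm (hF m x))
      (fun a ha y hy => hFG a ha y (by simp [hy]))

lemma pv_fgp_quad (f : Int → Int) :
    pv_fgp ((PySem.List.pyRange 0 4).map f) = max 1 (f 0 * f 1 * f 2 * f 3) := by
  have h4 : PySem.List.pyRange 0 (4:Int) = [0, 1, 2, 3] := by decide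
  unfold pv_fgp
  rw [h4]
  norm_num [pysem]
  rfl

lemma pv_fgp_map_range (f : Int → Int) (n : Nat) :
    pv_fgp ((PySem.List.pyRange 0 (n:Int)).map f)
    = (PySem.List.pyRange 0 ((n:Int) - 3)).foldl
        (fun best i => max best (f i * f (i+1) * f (i+2) * f (i+3))) 1 := by
  unfold pv_fgp
  have hlen : ((PySem.List.pyRange 0 (n:Int)).map f).length = n := by
    rw [PySem.List.pyRange_zero_natCast]; simp
  rw [hlen]
  apply PySem.List.foldl_congr_mem
  intro acc i hi
  have h := PySem.List.mem_pyRange_one.mp hi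
  rw [PySem.List.pyGetD_map_pyRange_of_nonneg f _ i 0 (by omega) (by omega),
      PySem.List.pyGetD_map_pyRange_of_nonneg f _ (i+1) 0 (by omega) (by omega),
      PySem.List.pyGetD_map_pyRange_of_nonneg f _ (i+2) 0 (by omega) (by omega),
      PySem.List.pyGetD_map_pyRange_of_nonneg f _ (i+3) 0 (by omega) (by omega)]

-- one horizontal pass: "max into the helper's fold" = "fold from the accumulator"
lemma pv_pass1_eq (grid : List (List Int)) (m : Int) (hm : 1 ≤ m) :
    grid.foldl (fun mp row => max mp (pv_fgp row)) m
    = grid.foldl (fun best row =>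
        (PySem.List.pyRange 0 ((row.length : Int) - 3)).foldl
          (fun best j => max best (PySem.List.pyGetD row j 0 * PySem.List.pyGetD row (j+1) 0 *
            PySem.List.pyGetD row (j+2) 0 * PySem.List.pyGetD row (j+3) 0)) best) m := by
  apply pv_foldl_congr_inv _ _ _ m hm _ (fun a x => le_max_left _ _)
  intro a ha row _
  simp only [pv_fgp]
  exact pv_max_foldl _ _ a ha

-- vertical pass
lemma pv_pass2_eq (grid : List (List Int)) (m : Int) (hm : 1 ≤ m) :
    (PySem.List.pyRange 0 (((PySem.List.pyGetD grid 0 []).length : Int))).foldl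
      (fun mp col =>
        max mp (pv_fgp ((PySem.List.pyRange 0 ((grid.length : Int))).map
          (fun row => PySem.List.pyGetD (PySem.List.pyGetD grid row []) col 0)))) m
    = (PySem.List.pyRange 0 (((PySem.List.pyGetD grid 0 []).length : Int))).foldl
        (fun best j =>
          (PySem.List.pyRange 0 ((grid.length : Int) - 3)).foldl
            (fun best i => max best (PySem.List.pyGetD (PySem.List.pyGetD grid i []) j 0 *
              PySem.List.pyGetD (PySem.List.pyGetD grid (i+1) []) j 0 *
              PySem.List.pyGetD (PySem.List.pyGetD grid (i+2) []) j 0 *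
              PySem.List.pyGetD (PySem.List.pyGetD grid (i+3) []) j 0)) best) m := by
  apply pv_foldl_congr_inv _ _ _ m hm _ (fun a x => le_max_left _ _)
  intro a ha col _
  rw [pv_fgp_map_range (fun row => PySem.List.pyGetD (PySem.List.pyGetD grid row []) col 0) grid.length]
  exact pv_max_foldl _ _ a ha

-- down-right diagonal pass
lemma pv_pass3_eq (grid : List (List Int)) (m : Int) (hm : 1 ≤ m) :
    (PySem.List.pyRange 0 ((grid.length : Int) - 3)).foldl
      (fun mp i => (PySem.List.pyRange 0 (((PySem.List.pyGetD grid 0 []).length : Int) - 3)).foldl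
        (fun mp j =>
          max mp (pv_fgp ((PySem.List.pyRange 0 4).map
            (fun k => PySem.List.pyGetD (PySem.List.pyGetD grid (i+k) []) (j+k) 0)))) mp) m
    = (PySem.List.pyRange 0 ((grid.length : Int) - 3)).foldl
        (fun best i => (PySem.List.pyRange 0 (((PySem.List.pyGetD grid 0 []).length : Int) - 3)).foldl
          (fun best j => max best (PySem.List.pyGetD (PySem.List.pyGetD grid i []) j 0 *
            PySem.List.pyGetD (PySem.List.pyGetD grid (i+1) []) (j+1) 0 *
            PySem.List.pyGetD (PySem.List.pyGetD grid (i+2) []) (j+2) 0 *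
            PySem.List.pyGetD (PySem.List.pyGetD grid (i+3) []) (j+3) 0)) best) m := by
  apply pv_foldl_congr_inv _ _ _ m hm _
    (fun a x => pv_foldl_ge _ (fun b y => le_max_left _ _) _ a)
  intro a ha i _
  apply pv_foldl_congr_inv _ _ _ a ha _ (fun b y => le_max_left _ _)
  intro b hb j _
  rw [pv_fgp_quad (fun k => PySem.List.pyGetD (PySem.List.pyGetD grid (i+k) []) (j+k) 0)]
  show max b (max 1 _) = _
  rw [← max_assoc, max_eq_left hb]
  norm_num

-- down-left diagonal pass
lemma pv_pass4_eq (grid : List (List Int)) (m : Int) (hm : 1 ≤ m) :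
    (PySem.List.pyRange 3 ((grid.length : Int))).foldl
      (fun mp i => (PySem.List.pyRange 0 (((PySem.List.pyGetD grid 0 []).length : Int) - 3)).foldl
        (fun mp j =>
          max mp (pv_fgp ((PySem.List.pyRange 0 4).map
            (fun k => PySem.List.pyGetD (PySem.List.pyGetD grid (i-k) []) (j+k) 0)))) mp) m
    = (PySem.List.pyRange 3 ((grid.length : Int))).foldl
        (fun best i => (PySem.List.pyRange 0 (((PySem.List.pyGetD grid 0 []).length : Int) - 3)).foldl
          (fun best j => max best (PySem.List.pyGetD (PySem.List.pyGetD grid i []) j 0 *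
            PySem.List.pyGetD (PySem.List.pyGetD grid (i-1) []) (j+1) 0 *
            PySem.List.pyGetD (PySem.List.pyGetD grid (i-2) []) (j+2) 0 *
            PySem.List.pyGetD (PySem.List.pyGetD grid (i-3) []) (j+3) 0)) best) m := by
  apply pv_foldl_congr_inv _ _ _ m hm _
    (fun a x => pv_foldl_ge _ (fun b y => le_max_left _ _) _ a)
  intro a ha i _
  apply pv_foldl_congr_inv _ _ _ a ha _ (fun b y => le_max_left _ _)
  intro b hb j _
  rw [pv_fgp_quad (fun k => PySem.List.pyGetD (PySem.List.pyGetD grid (i-k) []) (j+k) 0)]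
  show max b (max 1 _) = _
  rw [← max_assoc, max_eq_left hb]
  norm_num

lemma pv_main_eq (grid : List (List Int)) :
    find_greatest_product_in_grid grid = pvFlat grid := by
  simp only [find_greatest_product_in_grid, pvFlat, pvPass, pvHp, pvVp, pvDp, pvEp, pvG]
  have g1 : (1:Int) ≤ grid.foldl (fun mp row => max mp (pv_fgp row)) 1 :=
    pv_foldl_ge _ (fun a x => le_max_left _ _) _ 1
  rw [pv_pass1_eq grid 1 le_rfl] at g1 ⊢
  set B1 := grid.foldl (fun best row =>
      (PySem.List.pyRange 0 ((row.length : Int) - 3)).foldl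
        (fun best j => max best (PySem.List.pyGetD row j 0 * PySem.List.pyGetD row (j+1) 0 *
          PySem.List.pyGetD row (j+2) 0 * PySem.List.pyGetD row (j+3) 0)) best) 1 with hB1
  have g2 : (1:Int) ≤ (PySem.List.pyRange 0 (((PySem.List.pyGetD grid 0 []).length : Int))).foldl
      (fun mp col =>
        max mp (pv_fgp ((PySem.List.pyRange 0 ((grid.length : Int))).map
          (fun row => PySem.List.pyGetD (PySem.List.pyGetD grid row []) col 0)))) B1 :=
    le_trans g1 (pv_foldl_ge _ (fun a x => le_max_left _ _) _ B1)
  rw [pv_pass2_eq grid B1 g1] at g2 ⊢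
  set B2 := (PySem.List.pyRange 0 (((PySem.List.pyGetD grid 0 []).length : Int))).foldl
        (fun best j =>
          (PySem.List.pyRange 0 ((grid.length : Int) - 3)).foldl
            (fun best i => max best (PySem.List.pyGetD (PySem.List.pyGetD grid i []) j 0 *
              PySem.List.pyGetD (PySem.List.pyGetD grid (i+1) []) j 0 *
              PySem.List.pyGetD (PySem.List.pyGetD grid (i+2) []) j 0 *
              PySem.List.pyGetD (PySem.List.pyGetD grid (i+3) []) j 0)) best) B1 with hB2
  have g3 : (1:Int) ≤ (PySem.List.pyRange 0 ((grid.length : Int) - 3)).foldl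
      (fun mp i => (PySem.List.pyRange 0 (((PySem.List.pyGetD grid 0 []).length : Int) - 3)).foldl
        (fun mp j =>
          max mp (pv_fgp ((PySem.List.pyRange 0 4).map
            (fun k => PySem.List.pyGetD (PySem.List.pyGetD grid (i+k) []) (j+k) 0)))) mp) B2 :=
    le_trans g2 (pv_foldl_ge _ (fun a x => pv_foldl_ge _ (fun b y => le_max_left _ _) _ a) _ B2)
  rw [pv_pass3_eq grid B2 g2] at g3 ⊢
  set B3 := (PySem.List.pyRange 0 ((grid.length : Int) - 3)).foldl
        (fun best i => (PySem.List.pyRange 0 (((PySem.List.pyGetD grid 0 []).length : Int) - 3)).foldl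
          (fun best j => max best (PySem.List.pyGetD (PySem.List.pyGetD grid i []) j 0 *
            PySem.List.pyGetD (PySem.List.pyGetD grid (i+1) []) (j+1) 0 *
            PySem.List.pyGetD (PySem.List.pyGetD grid (i+2) []) (j+2) 0 *
            PySem.List.pyGetD (PySem.List.pyGetD grid (i+3) []) (j+3) 0)) best) B2 with hB3
  exact pv_pass4_eq grid B3 g3

-- ===== VERDICT (by name: the statement is the Claim_ definition above) =====
theorem find_greatest_product_in_grid_spec : Claim_equal_find_greatest_product_in_grid := by
  intro grid _ hpre
  show find_greatest_product_in_grid grid = find_greatest_product_in_grid_alt grid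
  rw [pv_main_eq grid, pv_alt_eq grid]
  exact le_antisymm (pv_flat_le_altF grid hpre) (pv_altF_le_flat grid)
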